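-- pv_equiv track=rewrite | github.com/Cadiac/immaybesorry | imneversorry/plugins/oppija.py | invert_string_list
-- ===== SOURCE A (Python) =====
-- def invert_string_list(list):
--     # Reference table for the Unicode chars: http://www.upsidedowntext.com/unicode
--     chars_standard = "abcdefghijklmnopqrstuvwxyzåäö"
--     chars_inverted = "ɐqɔpǝɟbɥıɾʞןɯuodbɹsʇnʌʍxʎzɐɐo"
--
--     chars_standard += "_,;.?!/\\\"<>(){}[]`&"
--     chars_inverted += "‾`؛˙¿¡\\/,><)(}{][,⅋"
--
--     chars_standard += "ABCDEFGHIJKLMNOPQRSTUVWXYZÅÄÖ"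
--     chars_inverted += "∀qϽᗡƎℲƃHIſʞ˥WNOԀὉᴚS⊥∩ΛMXʎZ∀∀O"
--
--     chars_standard += "0123456789"
--     chars_inverted += "0ƖᄅƐㄣϛ9ㄥ86"
--
--     inverted_list = []
--     for string in list:
--         inverted_string = ""
--
--         for char in string:
--             try:
--                 charIndex = chars_standard.index(char)
--             except:
--                 inverted_string += char
--                 continue
--             inverted_string += chars_inverted[charIndex]
--
--         # Reverse the string to make it readable upside down
--         inverted_list.append(inverted_string[::-1])
--
--     return inverted_list
-- ===== SOURCE B (Python) =====
-- def invert_string_list(list):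
--     chars_standard = "abcdefghijklmnopqrstuvwxyzåäö"
--     chars_inverted = "ɐqɔpǝɟbɥıɾʞןɯuodbɹsʇnʌʍxʎzɐɐo"
--
--     chars_standard += "_,;.?!/\\\"<>(){}[]`&"
--     chars_inverted += "‾`؛˙¿¡\\/,><)(}{][,⅋"
--
--     chars_standard += "ABCDEFGHIJKLMNOPQRSTUVWXYZÅÄÖ"
--     chars_inverted += "∀qϽᗡƎℲƃHIſʞ˥WNOԀὉᴚS⊥∩ΛMXʎZ∀∀O"
--
--     chars_standard += "0123456789"
--     chars_inverted += "0ƖᄅƐㄣϛ9ㄥ86"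
--
--     # dict lookup replaces the repeated linear .index scan with try/except;
--     # the reversed string is built directly by prepending in one forward pass,
--     # so no separate [::-1] reversal pass is needed.
--     table = dict(zip(chars_standard, chars_inverted))
--     result = []
--     for s in list:
--         rev = ""
--         for ch in s:
--             rev = table.get(ch, ch) + rev
--         result.append(rev)
--     return result
-- ===== Notes on version B (the rewrite author's own statement) =====
-- stated objective: faster
-- what changed: B builds a dict from zipped tables once (removing A's per-character linear .index scan with try/except) and constructs each reversed string directly by prepending mapped characters during a single forward pass, eliminating A's separate [::-1] reversal step.
import Mathlib
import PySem

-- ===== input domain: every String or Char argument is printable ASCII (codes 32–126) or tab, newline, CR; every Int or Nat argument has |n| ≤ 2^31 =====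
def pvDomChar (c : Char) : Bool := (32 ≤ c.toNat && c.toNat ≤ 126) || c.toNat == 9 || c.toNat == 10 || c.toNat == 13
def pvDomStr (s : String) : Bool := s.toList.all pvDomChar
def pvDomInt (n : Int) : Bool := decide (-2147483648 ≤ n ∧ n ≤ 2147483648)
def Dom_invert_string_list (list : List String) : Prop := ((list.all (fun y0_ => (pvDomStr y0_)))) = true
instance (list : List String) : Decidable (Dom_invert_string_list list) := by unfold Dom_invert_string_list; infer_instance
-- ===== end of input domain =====

-- B builds a dict from the zipped tables once (no per-char .index scan / try-except) and
-- builds each reversed string by prepending during one forward pass (no [::-1] step).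

-- shared data literals (the four concatenated segments, exactly as the Python builds them)
def pvStd : List Char :=
  "abcdefghijklmnopqrstuvwxyzåäö".toList ++ "_,;.?!/\\\"<>(){}[]`&".toList ++
  "ABCDEFGHIJKLMNOPQRSTUVWXYZÅÄÖ".toList ++ "0123456789".toList
def pvInv : List Char :=
  "ɐqɔpǝɟbɥıɾʞןɯuodbɹsʇnʌʍxʎzɐɐo".toList ++ "‾`؛˙¿¡\\/,><)(}{][,⅋".toList ++
  "∀qϽᗡƎℲƃHIſʞ˥WNOԀὉᴚS⊥∩ΛMXʎZ∀∀O".toList ++ "0ƖᄅƐㄣϛ9ㄥ86".toList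

-- ===== PORT A =====
-- inner loop: try chars_standard.index(char) (none = ValueError → keep char),
-- else chars_inverted[charIndex] (always in range: the two tables have equal length,
-- so the .getD default is never used); outer loop appends inverted_string[::-1] (= reverse)
def invert_string_list (list : List String) : List String :=
  list.foldl (fun invertedList s =>
    let invertedString : List Char :=
      s.toList.foldl (fun acc c =>
        match PySem.List.index? pvStd c with
        | none => acc ++ [c]
        | some i => acc ++ [pvInv.getD i c]) []
    invertedList ++ [String.mk invertedString.reverse]) []

-- ===== PORT B =====
-- table = dict(zip(chars_standard, chars_inverted)): a fold of insertions over the pairs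
def pvTable : PySem.Dict Char Char :=
  (pvStd.zip pvInv).foldl (fun d p => d.insert p.1 p.2) PySem.Dict.empty

-- inner loop: rev = table.get(ch, ch) + rev (a one-char prepend); no reversal step
def invert_string_list_alt (list : List String) : List String :=
  list.foldl (fun result s =>
    result ++ [String.mk (s.toList.foldl (fun rev c => (pvTable.getD c c) :: rev) [])]) []

-- ===== PRECONDITION & SPEC =====
def Spec_invert_string_list (list : List String) (out : List String) : Prop := out = invert_string_list_alt list
instance (list : List String) (out : List String) : Decidable (Spec_invert_string_list list out) := by unfold Spec_invert_string_list; infer_instance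

-- ===== CLAIM (what is proved, stated in full; the proofs are below) =====
def Claim_equal_invert_string_list : Prop := ∀ (list : List String), Dom_invert_string_list list → Spec_invert_string_list list (invert_string_list list)

-- ===== LEMMAS AND PROOFS =====

lemma lookup_eq_none_of_not_mem (ps : List (Char × Char)) (c : Char)
    (h : c ∉ ps.map Prod.fst) : ps.lookup c = none := by
  induction ps with
  | nil => rfl
  | cons p ps ih =>
    simp only [List.map_cons, List.mem_cons, not_or] at h
    have : (c == p.1) = false := by simpa using h.1
    simp [List.lookup, this, ih h.2]

-- a dict built by inserting distinct-keyed pairs looks up like first-match association lookup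
lemma getD_foldl_insert_lookup (ps : List (Char × Char)) (d : PySem.Dict Char Char)
    (c dflt : Char) (hnd : (ps.map Prod.fst).Nodup) :
    ((ps.foldl (fun d p => d.insert p.1 p.2) d).getD c dflt) =
      (match ps.lookup c with
       | some v => v
       | none => d.getD c dflt) := by
  induction ps generalizing d with
  | nil => simp
  | cons p ps ih =>
    simp only [List.map_cons, List.nodup_cons] at hnd
    rw [List.foldl_cons, ih _ hnd.2]
    by_cases hc : c = p.1
    · subst hc
      rw [lookup_eq_none_of_not_mem ps _ hnd.1]
      simp [List.lookup]
    · have hbeq : (c == p.1) = false := by simpa using hc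
      simp only [List.lookup, hbeq]
      rcases h : ps.lookup c with _ | v <;>
        simp [PySem.Dict.getD_insert, hc]

-- first-match lookup in a zipped table = index into the key list, then fetch from the value list
lemma lookup_zip_getD (ks vs : List Char) (c : Char) :
    (((ks.zip vs).lookup c).getD c) =
      (match PySem.List.index? ks c with
       | none => c
       | some i => vs.getD i c) := by
  induction ks generalizing vs with
  | nil => simp [PySem.List.index?]
  | cons k ks ih =>
    cases vs with
    | nil =>
      rcases PySem.List.index? (k :: ks) c with _ | i <;> simp
    | cons v vs =>
      by_cases hk : k = c
      · subst hk
        rw [PySem.List.index?_cons_self]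
        simp
      · rw [PySem.List.index?_cons_of_ne ks hk]
        have hbeq : (c == k) = false := by simpa using Ne.symm hk
        simp only [List.zip_cons_cons, List.lookup, hbeq]
        rw [ih vs]
        rcases PySem.List.index? ks c with _ | i <;> simp

lemma pvStd_nodup : (pvStd.zip pvInv).map Prod.fst |>.Nodup := by decide

-- per-character agreement of the two mapping mechanisms
lemma table_getD_eq (c : Char) :
    pvTable.getD c c =
      (match PySem.List.index? pvStd c with
       | none => c
       | some i => pvInv.getD i c) := by
  rw [pvTable, getD_foldl_insert_lookup _ _ _ _ pvStd_nodup]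
  rcases h : (pvStd.zip pvInv).lookup c with _ | v
  · have := lookup_zip_getD pvStd pvInv c
    rw [h] at this
    simpa using this
  · have := lookup_zip_getD pvStd pvInv c
    rw [h] at this
    simpa using this

-- prepend-accumulator loop = reverse of the mapped list
lemma foldl_cons_eq_reverse_map (g : Char → Char) (l acc : List Char) :
    l.foldl (fun rev c => g c :: rev) acc = (l.map g).reverse ++ acc := by
  induction l generalizing acc with
  | nil => simp
  | cons x l ih => simp [ih]

lemma inner_eq (s : String) :
    (s.toList.foldl (fun acc c =>
        match PySem.List.index? pvStd c with
        | none => acc ++ [c]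
        | some i => acc ++ [pvInv.getD i c]) []).reverse
      = s.toList.foldl (fun rev c => (pvTable.getD c c) :: rev) [] := by
  have hf : (fun (acc : List Char) (c : Char) =>
        match PySem.List.index? pvStd c with
        | none => acc ++ [c]
        | some i => acc ++ [pvInv.getD i c])
      = (fun acc c => acc ++ [pvTable.getD c c]) := by
    funext acc c
    rw [table_getD_eq]
    rcases PySem.List.index? pvStd c with _ | i <;> simp
  rw [hf, PySem.List.foldl_append_singleton_eq_map, List.nil_append,
      foldl_cons_eq_reverse_map, List.append_nil]

-- ===== VERDICT (by name: the statement is the Claim_ definition above) =====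
theorem invert_string_list_spec : Claim_equal_invert_string_list := by
  intro list _
  unfold Spec_invert_string_list invert_string_list invert_string_list_alt
  simp only [inner_eq]
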